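-- pv_equiv track=rewrite | github.com/gjanee/advent-of-code-2023 | 18.py | to_polygon
-- ===== SOURCE A (Python) =====
-- def to_polygon(directives):
--     # We use a Cartesian (x, y) coordinate system for this puzzle
--     # instead of the (row, column) coordinate system used in previous
--     # puzzles.
--     dirs = {"R": (1, 0), "L": (-1, 0), "U": (0, 1), "D": (0, -1)}
--     vertices = [(0, 0)]
--     r, c = 0, 0
--     for i, (d, n) in enumerate(directives[:-1]):
--         r += dirs[d][0]*n
--         c += dirs[d][1]*n
--         if d != directives[i+1][0]:  # if at turn
--             vertices.append((r, c))
--     if directives[0][0] == directives[-1][0]: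
--         # If the first and last directions are the same, then the
--         # first and last edges are collinear and the starting vertex
--         # can be eliminated.
--         del vertices[0]
--     return vertices
-- ===== SOURCE B (Python) =====
-- def to_polygon(directives):
--     dirs = {"R": (1, 0), "L": (-1, 0), "U": (0, 1), "D": (0, -1)}
--     # Phase 1: group the directives into maximal same-direction runs by index
--     # scanning, summing each run's step counts.
--     runs = []
--     i = 0
--     while i < len(directives):
--         d = directives[i][0]
--         j, t = i, 0
--         while j < len(directives) and directives[j][0] == d:
--             t += directives[j][1]
--             j += 1
--         runs.append((d, t))
--         i = j
--     # Phase 2: cumulative coordinate lists; every run end except the last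
--     # run's is a vertex.
--     xs, ys = [0], [0]
--     for d, t in runs[:-1]:
--         dx, dy = dirs[d]
--         xs.append(xs[-1] + dx * t)
--         ys.append(ys[-1] + dy * t)
--     start = 1 if directives[0][0] == directives[-1][0] else 0
--     return list(zip(xs, ys))[start:]
-- ===== Notes on version B (the rewrite author's own statement) =====
-- stated objective: alternative
-- what changed: B groups the directives into maximal same-direction runs with index-based while loops (summing counts), then builds separate cumulative x- and y-coordinate lists over all runs but the last and zips and slices them into the vertex list, instead of A's single pass over directives[:-1] with a per-step lookahead at the next directive's direction.
import Mathlib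
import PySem

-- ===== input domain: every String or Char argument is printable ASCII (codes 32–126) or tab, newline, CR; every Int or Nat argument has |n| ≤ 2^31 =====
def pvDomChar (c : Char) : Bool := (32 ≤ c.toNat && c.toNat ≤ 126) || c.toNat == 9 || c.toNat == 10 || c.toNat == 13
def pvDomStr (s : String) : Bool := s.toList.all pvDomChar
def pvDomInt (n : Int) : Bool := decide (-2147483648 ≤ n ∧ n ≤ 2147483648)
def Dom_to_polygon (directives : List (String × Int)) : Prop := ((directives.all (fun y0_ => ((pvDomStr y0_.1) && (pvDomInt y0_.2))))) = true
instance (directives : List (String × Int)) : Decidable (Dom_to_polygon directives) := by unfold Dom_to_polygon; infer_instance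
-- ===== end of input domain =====

-- B replaces A's single pass with per-step lookahead by two staged phases:
-- index-based while loops grouping the directives into maximal same-direction
-- runs, then cumulative x- and y-coordinate lists over all runs but the last,
-- zipped and sliced into the vertex list. Objective: alternative decomposition.

-- ===== PORT A =====
-- the dict literal 'dirs' (shared verbatim by both Pythons)
def pvDirs : PySem.Dict String (Int × Int) :=
  PySem.Dict.ofList [("R", (1, 0)), ("L", (-1, 0)), ("U", (0, 1)), ("D", (0, -1))]

-- dirs[d]; get? = none is Python's KeyError, excluded by Pre_to_polygon (default never used there)
def pvDir (d : String) : Int × Int := (pvDirs.get? d).getD (0, 0)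

-- A's loop body: move by dirs[d]*n, append (r, c) when the next directive turns
def pvBodyA (full : List (String × Int)) (st : List (Int × Int) × Int × Int)
    (p : Int × (String × Int)) : List (Int × Int) × Int × Int :=
  let dv := pvDir p.2.1
  let r := st.2.1 + dv.1 * p.2.2
  let c := st.2.2 + dv.2 * p.2.2
  let vs :=
    if p.2.1 ≠ ((PySem.List.pyGet? full (p.1 + 1)).getD ("", 0)).1
    then st.1 ++ [(r, c)] else st.1
  (vs, r, c)

def to_polygon (directives : List (String × Int)) : List (Int × Int) :=
  let st :=
    (PySem.List.enumerate (PySem.List.slice directives none (some (-1)))).foldl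
      (pvBodyA directives) ([(0, 0)], 0, 0)
  -- directives[0] / directives[-1]: in range under Pre_ (directives ≠ [])
  if ((PySem.List.pyGet? directives 0).getD ("", 0)).1
      = ((PySem.List.pyGet? directives (-1)).getD ("", 0)).1
  then st.1.tail else st.1

-- ===== PORT B =====
-- B's inner while loop: 'while j < len(directives) and directives[j][0] == d: t += …; j += 1'
-- (fuel = ds.length bounds the loop; it only guards totality, the loop stops by its own test first)
def pvRun (ds : List (String × Int)) (d : String) : Nat → Nat → Int → Nat × Int
  | 0, j, t => (j, t)
  | fuel + 1, j, t =>
    if h : j < ds.length then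
      if (ds[j]'h).1 = d then pvRun ds d fuel (j + 1) (t + (ds[j]'h).2) else (j, t)
    else (j, t)

-- B's outer while loop: scan runs by index, each run contributes (direction, summed count)
def pvGroup (ds : List (String × Int)) : Nat → Nat → List (String × Int)
  | 0, _ => []
  | fuel + 1, i =>
    if h : i < ds.length then
      ((ds[i]'h).1, (pvRun ds (ds[i]'h).1 ds.length i 0).2) ::
        pvGroup ds fuel (pvRun ds (ds[i]'h).1 ds.length i 0).1
    else []

-- B's phase-2 loop body: extend both cumulative coordinate lists (xs[-1] is pyGet? xs (-1))
def pvBodyXY (st : List Int × List Int) (p : String × Int) : List Int × List Int :=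
  let dv := pvDir p.1
  (st.1 ++ [(PySem.List.pyGet? st.1 (-1)).getD 0 + dv.1 * p.2],
   st.2 ++ [(PySem.List.pyGet? st.2 (-1)).getD 0 + dv.2 * p.2])

def to_polygon_alt (directives : List (String × Int)) : List (Int × Int) :=
  let runs := pvGroup directives directives.length 0
  let st := (PySem.List.slice runs none (some (-1))).foldl pvBodyXY ([0], [0])
  let start : Int :=
    if ((PySem.List.pyGet? directives 0).getD ("", 0)).1
        = ((PySem.List.pyGet? directives (-1)).getD ("", 0)).1
    then 1 else 0
  PySem.List.slice (st.1.zip st.2) (some start) none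

-- ===== PRECONDITION & SPEC =====
-- Exactly the inputs on which the Python A returns: a nonempty list (else directives[0]
-- raises IndexError) whose every direction except possibly the last element's is a key
-- of dirs (else dirs[d] raises KeyError; the last direction is only compared, never looked up).
def Pre_to_polygon (directives : List (String × Int)) : Prop :=
  directives ≠ [] ∧
    ∀ p ∈ directives.dropLast, p.1 = "R" ∨ p.1 = "L" ∨ p.1 = "U" ∨ p.1 = "D"
instance (directives : List (String × Int)) : Decidable (Pre_to_polygon directives) := by
  unfold Pre_to_polygon; infer_instance

def pvWitness_to_polygon : (List (String × Int)) := [("R", 2), ("U", 3), ("L", 2), ("D", 3)]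

def Spec_to_polygon (directives : List (String × Int)) (out : List (Int × Int)) : Prop := out = to_polygon_alt directives
instance (directives : List (String × Int)) (out : List (Int × Int)) : Decidable (Spec_to_polygon directives out) := by unfold Spec_to_polygon; infer_instance

-- ===== CLAIM (what is proved, stated in full; the proofs are below) =====
def Claim_equal_to_polygon : Prop := ∀ (directives : List (String × Int)), Dom_to_polygon directives → Pre_to_polygon directives → Spec_to_polygon directives (to_polygon directives)

-- ===== LEMMAS AND PROOFS =====

-- reference recursions used only by the proofs

-- A's loop, as pairwise recursion over consecutive directives
def pvPairsA (r c : Int) : List (String × Int) → List (Int × Int)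
  | [] => []
  | [_] => []
  | p :: q :: rest =>
      (if p.1 ≠ q.1 then [(r + (pvDir p.1).1 * p.2, c + (pvDir p.1).2 * p.2)] else []) ++
        pvPairsA (r + (pvDir p.1).1 * p.2) (c + (pvDir p.1).2 * p.2) (q :: rest)

-- A's loop over explicit (directive, next-direction) pairs
def pvCondWalk (r c : Int) : List ((String × Int) × String) → List (Int × Int)
  | [] => []
  | (p, d') :: rest =>
      (if p.1 ≠ d' then [(r + (pvDir p.1).1 * p.2, c + (pvDir p.1).2 * p.2)] else []) ++
        pvCondWalk (r + (pvDir p.1).1 * p.2) (c + (pvDir p.1).2 * p.2) rest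

-- run-grouping as left recursion with the open run (d, n) as accumulator
def pvGo (d : String) (n : Int) : List (String × Int) → List (String × Int)
  | [] => [(d, n)]
  | p :: rest => if d = p.1 then pvGo d (n + p.2) rest else (d, n) :: pvGo p.1 p.2 rest

-- structural version of B's inner while loop: (summed count, remaining directives)
def pvRunL (d : String) (t : Int) : List (String × Int) → Int × List (String × Int)
  | [] => (t, [])
  | p :: rest => if p.1 = d then pvRunL d (t + p.2) rest else (t, p :: rest)

-- positions visited walking a run list
def pvWalk (r c : Int) : List (String × Int) → List (Int × Int)
  | [] => []
  | p :: rest =>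
      (r + (pvDir p.1).1 * p.2, c + (pvDir p.1).2 * p.2) ::
        pvWalk (r + (pvDir p.1).1 * p.2) (c + (pvDir p.1).2 * p.2) rest

lemma pvFoldA_gen (full : List (String × Int)) :
    ∀ (xs : List (String × Int)) (nds : List String) (hl : xs.length = nds.length)
      (k : Int) (acc : List (Int × Int)) (r c : Int),
    (∀ (j : Nat) (h : j < xs.length),
        ((PySem.List.pyGet? full (k + 1 + (j : Int))).getD ("", 0)).1 = nds[j]'(hl ▸ h)) →
    ∃ r' c',
      (PySem.List.enumerate xs k).foldl (pvBodyA full) (acc, r, c)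
      = (acc ++ pvCondWalk r c (xs.zip nds), r', c') := by
  intro xs
  induction xs with
  | nil =>
    intro nds _ k acc r c _
    exact ⟨r, c, by simp [PySem.List.enumerate_nil, pvCondWalk]⟩
  | cons p xs ih =>
    intro nds hl k acc r c hnd
    cases nds with
    | nil => simp at hl
    | cons d' nds =>
      have hl' : xs.length = nds.length := by simpa using hl
      have h0 := hnd 0 (by simp)
      simp only [List.getElem_cons_zero, Nat.cast_zero, add_zero] at h0
      rw [PySem.List.enumerate_cons]
      simp only [List.foldl_cons, pvBodyA]
      have hnd' : ∀ (j : Nat) (h : j < xs.length),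
          ((PySem.List.pyGet? full (k + 1 + 1 + (j : Int))).getD ("", 0)).1
            = nds[j]'(hl' ▸ h) := by
        intro j hj
        have := hnd (j + 1) (by simpa using Nat.succ_lt_succ hj)
        simpa [add_assoc, add_comm, add_left_comm] using this
      obtain ⟨r', c', h⟩ := ih nds hl' (k + 1)
        (if p.1 ≠ ((PySem.List.pyGet? full (k + 1)).getD ("", 0)).1
          then acc ++ [(r + (pvDir p.1).1 * p.2, c + (pvDir p.1).2 * p.2)] else acc)
        (r + (pvDir p.1).1 * p.2) (c + (pvDir p.1).2 * p.2) hnd'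
      refine ⟨r', c', ?_⟩
      rw [h, h0]
      simp only [List.zip_cons_cons, pvCondWalk]
      by_cases hpd : p.1 = d' <;> simp [hpd]

lemma pvCondWalk_eq_pairsA :
    ∀ (ds : List (String × Int)) (r c : Int),
      pvCondWalk r c (ds.dropLast.zip (ds.tail.map (·.1))) = pvPairsA r c ds := by
  intro ds
  induction ds with
  | nil => intro r c; simp [pvCondWalk, pvPairsA]
  | cons p rest ih =>
    intro r c
    cases rest with
    | nil => simp [pvCondWalk, pvPairsA]
    | cons q rest' =>
      simp only [List.dropLast_cons_of_ne_nil (List.cons_ne_nil q rest'), List.tail_cons,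
        List.map_cons, List.zip_cons_cons, pvCondWalk, pvPairsA]
      rw [← ih]
      simp

lemma pvGo_ne_nil (xs : List (String × Int)) :
    ∀ (d : String) (n : Int), pvGo d n xs ≠ [] := by
  induction xs with
  | nil => intro d n; simp [pvGo]
  | cons p xs ih =>
    intro d n
    by_cases h : d = p.1 <;> simp [pvGo, h, ih]

lemma pvPairsA_shift :
    ∀ (rest : List (String × Int)) (d : String) (m k r c : Int),
      pvPairsA (r + (pvDir d).1 * k) (c + (pvDir d).2 * k) ((d, m) :: rest)
        = pvPairsA r c ((d, k + m) :: rest) := by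
  intro rest d m k r c
  cases rest with
  | nil => simp [pvPairsA]
  | cons q rest' =>
    have h1 : r + (pvDir d).1 * k + (pvDir d).1 * m = r + (pvDir d).1 * (k + m) := by ring
    have h2 : c + (pvDir d).2 * k + (pvDir d).2 * m = c + (pvDir d).2 * (k + m) := by ring
    simp only [pvPairsA, h1, h2]

lemma pvPairsA_eq_walk_go :
    ∀ (rest : List (String × Int)) (d : String) (n : Int) (r c : Int),
      pvPairsA r c ((d, n) :: rest) = pvWalk r c ((pvGo d n rest).dropLast) := by
  intro rest
  induction rest with
  | nil => intro d n r c; simp [pvPairsA, pvGo, pvWalk]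
  | cons q rest' ih =>
    intro d n r c
    obtain ⟨qd, qn⟩ := q
    by_cases h : d = qd
    · subst h
      rw [pvGo, if_pos rfl, ← ih d (n + qn) r c, ← pvPairsA_shift rest' d qn n r c]
      simp [pvPairsA]
    · rw [pvGo, if_neg h, List.dropLast_cons_of_ne_nil (pvGo_ne_nil rest' qd qn)]
      rw [pvWalk, ← ih qd qn]
      simp [pvPairsA, h]

-- B's inner while loop computes pvRunL on the dropped suffix
lemma pvRunL_len (d : String) :
    ∀ (xs : List (String × Int)) (t : Int), (pvRunL d t xs).2.length ≤ xs.length := by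
  intro xs
  induction xs with
  | nil => intro t; simp [pvRunL]
  | cons p rest ih =>
    intro t
    by_cases h : p.1 = d
    · simp only [pvRunL, if_pos h]
      exact le_trans (ih (t + p.2)) (by simp)
    · simp [pvRunL, h]

lemma pvRun_eq_runL (ds : List (String × Int)) (d : String) :
    ∀ (xs : List (String × Int)) (fuel j : Nat) (t : Int),
      ds.drop j = xs → xs.length ≤ fuel →
      pvRun ds d fuel j t
          = (j + (xs.length - (pvRunL d t xs).2.length), (pvRunL d t xs).1) ∧
      ds.drop (j + (xs.length - (pvRunL d t xs).2.length)) = (pvRunL d t xs).2 := by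
  intro xs
  induction xs with
  | nil =>
    intro fuel j t hdrop _
    have hj : ds.length ≤ j := by
      by_contra hlt
      have : ds.drop j ≠ [] := by
        simp only [ne_eq, List.drop_eq_nil_iff]
        omega
      exact this hdrop
    have hnj : ¬ j < ds.length := by omega
    refine ⟨?_, by simpa [pvRunL] using hdrop⟩
    cases fuel with
    | zero => simp [pvRun, pvRunL]
    | succ fuel => simp [pvRun, pvRunL, hnj]
  | cons p rest ih =>
    intro fuel j t hdrop hfuel
    have hj : j < ds.length := by
      by_contra hge
      rw [List.drop_eq_nil_iff.2 (by omega)] at hdrop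
      exact (List.cons_ne_nil p rest) hdrop.symm
    have hget : ds[j]'hj = p := by
      have h0 : (ds.drop j)[0]'(by rw [hdrop]; simp) = p := by
        simp [hdrop]
      rw [List.getElem_drop] at h0
      simpa using h0
    have hdrop' : ds.drop (j + 1) = rest := by
      have ht : (ds.drop j).tail = ds.drop (j + 1) := List.tail_drop
      rw [hdrop] at ht
      simpa using ht.symm
    cases fuel with
    | zero => simp at hfuel
    | succ fuel =>
      rw [pvRun, dif_pos hj, hget]
      by_cases h : p.1 = d
      · have hL : pvRunL d t (p :: rest) = pvRunL d (t + p.2) rest := by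
          simp [pvRunL, h]
        obtain ⟨h1, h2⟩ := ih fuel (j + 1) (t + p.2) hdrop' (by simp at hfuel; omega)
        have hlen := pvRunL_len d rest (t + p.2)
        have hk : j + ((p :: rest).length - (pvRunL d (t + p.2) rest).2.length)
            = j + 1 + (rest.length - (pvRunL d (t + p.2) rest).2.length) := by
          simp only [List.length_cons]
          omega
        rw [if_pos h, hL, hk]
        exact ⟨h1, h2⟩
      · have hL : pvRunL d t (p :: rest) = (t, p :: rest) := by
          simp [pvRunL, h]
        rw [if_neg h, hL]
        exact ⟨by simp, by simpa using hdrop⟩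

-- B's outer while loop equals accumulator-style run grouping
lemma pvGo_runL (d : String) :
    ∀ (xs : List (String × Int)) (n : Int),
      pvGo d n xs
        = (d, (pvRunL d n xs).1) ::
            (match (pvRunL d n xs).2 with
             | [] => []
             | p :: rest => pvGo p.1 p.2 rest) := by
  intro xs
  induction xs with
  | nil => intro n; simp [pvGo, pvRunL]
  | cons p rest ih =>
    intro n
    by_cases h : d = p.1
    · rw [pvGo, if_pos h, ih (n + p.2)]
      simp [pvRunL, h.symm]
    · rw [pvGo, if_neg h]
      simp [pvRunL, Ne.symm h]

lemma pvGroup_eq_go (ds : List (String × Int)) :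
    ∀ (fuel i : Nat), ds.length - i ≤ fuel →
      pvGroup ds fuel i
        = (match ds.drop i with
           | [] => []
           | p :: rest => pvGo p.1 p.2 rest) := by
  intro fuel
  induction fuel with
  | zero =>
    intro i hk
    rw [pvGroup, List.drop_eq_nil_iff.2 (by omega)]
  | succ fuel ih =>
    intro i hk
    by_cases h : i < ds.length
    · have hdrop : ds.drop i = ds[i]'h :: ds.drop (i + 1) := List.drop_eq_getElem_cons h
      obtain ⟨h1, h2⟩ :=
        pvRun_eq_runL ds (ds[i]'h).1 (ds.drop i) ds.length i 0 rfl (by simp)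
      have hL : pvRunL (ds[i]'h).1 0 (ds.drop i)
          = pvRunL (ds[i]'h).1 ((ds[i]'h).2) (ds.drop (i + 1)) := by
        rw [hdrop]
        simp [pvRunL]
      have hlen := pvRunL_len (ds[i]'h).1 (ds.drop (i + 1)) ((ds[i]'h).2)
      have hlendrop : (ds.drop i).length = ds.length - i := List.length_drop
      have hlendrop' : (ds.drop (i + 1)).length = ds.length - (i + 1) := List.length_drop
      rw [pvGroup, dif_pos h, h1,
        ih (i + ((ds.drop i).length - (pvRunL (ds[i]'h).1 0 (ds.drop i)).2.length))
          (by rw [hL]; rw [hL] at h2; omega),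
        h2, hdrop]
      show _ = pvGo (ds[i]'h).1 (ds[i]'h).2 (ds.drop (i + 1))
      rw [pvGo_runL, ← hL, ← hdrop]
    · rw [pvGroup, dif_neg h, List.drop_eq_nil_iff.2 (by omega)]

-- phase-2 fold characterised: cumulative coordinate lists zip to the walk positions
lemma pvFoldXY_gen :
    ∀ (rs : List (String × Int)) (xs0 ys0 : List Int) (r c : Int)
      (hx : xs0 ≠ []) (hy : ys0 ≠ [])
      (hxl : xs0.getLast hx = r) (hyl : ys0.getLast hy = c),
      (rs.foldl pvBodyXY (xs0, ys0))
        = (xs0 ++ (pvWalk r c rs).map Prod.fst, ys0 ++ (pvWalk r c rs).map Prod.snd) := by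
  intro rs
  induction rs with
  | nil => intro xs0 ys0 r c _ _ _ _; simp [pvWalk]
  | cons p rest ih =>
    intro xs0 ys0 r c hx hy hxl hyl
    simp only [List.foldl_cons, pvBodyXY, PySem.List.pyGet?_neg_one,
      List.getLast?_eq_getLast_of_ne_nil hx, List.getLast?_eq_getLast_of_ne_nil hy,
      Option.getD_some, hxl, hyl]
    rw [ih (xs0 ++ [r + (pvDir p.1).1 * p.2]) (ys0 ++ [c + (pvDir p.1).2 * p.2])
      (r + (pvDir p.1).1 * p.2) (c + (pvDir p.1).2 * p.2)
      (by simp) (by simp) (by simp) (by simp)]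
    simp [pvWalk]

lemma pv_zip_walk (rs : List (String × Int)) :
    ((([0] : List Int) ++ (pvWalk 0 0 rs).map Prod.fst).zip
        (([0] : List Int) ++ (pvWalk 0 0 rs).map Prod.snd))
      = (0, 0) :: pvWalk 0 0 rs := by
  rw [List.zip_append (by simp)]
  simp [List.zip_map']

-- A's fold characterised: the vertex list is (0,0) followed by the turn positions
lemma pv_verticesA (ds : List (String × Int)) :
    ∃ rA cA,
      (PySem.List.enumerate (PySem.List.slice ds none (some (-1)))).foldl
          (pvBodyA ds) ([(0, 0)], 0, 0)
        = (((0, 0) : Int × Int) :: pvPairsA 0 0 ds, rA, cA) := by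
  rw [PySem.List.slice_to_neg_one]
  have hl : ds.dropLast.length = (ds.tail.map (·.1)).length := by
    simp [List.length_dropLast, List.length_tail]
  have hnd : ∀ (j : Nat) (h : j < ds.dropLast.length),
      ((PySem.List.pyGet? ds ((0 : Int) + 1 + (j : Int))).getD ("", 0)).1
        = (ds.tail.map (·.1))[j]'(hl ▸ h) := by
    intro j hj
    have hj' : j + 1 < ds.length := by
      simp only [List.length_dropLast] at hj; omega
    have hc : (0 : Int) + 1 + (j : Int) = ((j + 1 : Nat) : Int) := by push_cast; ring
    rw [hc, PySem.List.pyGet?_natCast, List.getElem?_eq_getElem hj']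
    simp [List.getElem_tail]
  obtain ⟨rA, cA, hA⟩ := pvFoldA_gen ds ds.dropLast (ds.tail.map (·.1)) hl 0 [(0, 0)] 0 0 hnd
  rw [pvCondWalk_eq_pairsA] at hA
  exact ⟨rA, cA, by simpa using hA⟩

-- ===== VERDICT (by name: the statement is the Claim_ definition above) =====
theorem to_polygon_spec : Claim_equal_to_polygon := by
  intro ds _ hpre
  unfold Spec_to_polygon to_polygon to_polygon_alt
  obtain ⟨rA, cA, hA⟩ := pv_verticesA ds
  simp only [hA]
  obtain ⟨hne, -⟩ := hpre
  obtain ⟨p, rest, rfl⟩ := List.exists_cons_of_ne_nil hne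
  have hruns : pvGroup (p :: rest) (p :: rest).length 0 = pvGo p.1 p.2 rest := by
    rw [pvGroup_eq_go (p :: rest) (p :: rest).length 0 (by omega)]
    rfl
  rw [hruns, PySem.List.slice_to_neg_one,
    pvFoldXY_gen ((pvGo p.1 p.2 rest).dropLast) [0] [0] 0 0
      (by simp) (by simp) (by simp) (by simp)]
  rw [pv_zip_walk, ← pvPairsA_eq_walk_go]
  simp only [Prod.mk.eta]
  split_ifs with hcond
  · rw [PySem.List.slice_from_one, List.tail_cons]
  · simp [PySem.List.slice_none_none]
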